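-- pv_equiv track=rewrite | github.com/w-vac/wikipedia_webscraper1.0 | scraper1.0.py | is_valid_wiki_link
-- ===== SOURCE A (Python) =====
-- def is_valid_wiki_link(href):
--     """Check if the link is a valid Wikipedia article link."""
--     if href is None:
--         return False
--     if href.startswith("/wiki/"):
--         # Exclude links to non-article pages
--         excluded_prefixes = ['/wiki/Special:', '/wiki/Help:', '/wiki/File:', '/wiki/Template:', '/wiki/Talk:',
--                              '/wiki/Category:', '/wiki/Portal:', '/wiki/Main_Page', '/wiki/User:', '/wiki/Wikipedia:']
--         return not any(href.startswith(prefix) for prefix in excluded_prefixes)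
--     return False
-- ===== SOURCE B (Python) =====
-- _EXCLUDED_NAMESPACES = {"Special", "Help", "File", "Template", "Talk",
--                         "Category", "Portal", "User", "Wikipedia"}
--
--
-- def is_valid_wiki_link(href):
--     """Check if the link is a valid Wikipedia article link."""
--     if href is None or not href.startswith("/wiki/"):
--         return False
--     title = href[6:]
--     if title.startswith("Main_Page"):
--         return False
--     i = title.find(":")
--     if i < 0:
--         return True
--     return title[:i] not in _EXCLUDED_NAMESPACES
-- ===== Notes on version B (the rewrite author's own statement) =====
-- stated objective: simpler
-- what changed: Instead of scanning ten full '/wiki/…' prefixes, B strips '/wiki/' once, rejects a 'Main_Page' prefix, and otherwise extracts the namespace before the first ':' and does a single set lookup.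
import Mathlib
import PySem

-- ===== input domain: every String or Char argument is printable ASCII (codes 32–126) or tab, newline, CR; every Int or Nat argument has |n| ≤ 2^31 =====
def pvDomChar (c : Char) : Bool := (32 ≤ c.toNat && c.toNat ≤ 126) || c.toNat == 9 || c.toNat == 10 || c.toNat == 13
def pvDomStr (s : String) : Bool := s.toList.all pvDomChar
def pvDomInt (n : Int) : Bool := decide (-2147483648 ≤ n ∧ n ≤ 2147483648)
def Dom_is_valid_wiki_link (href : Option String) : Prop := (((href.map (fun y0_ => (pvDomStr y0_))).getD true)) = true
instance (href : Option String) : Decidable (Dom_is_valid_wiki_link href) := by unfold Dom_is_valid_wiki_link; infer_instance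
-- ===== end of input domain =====

-- B replaces A's scan over ten full '/wiki/…' prefixes by stripping '/wiki/' once and
-- classifying the namespace before the first ':' with a single set lookup (objective: simpler).

-- ===== PORT A =====
def is_valid_wiki_link (href : Option String) : Bool :=
  match href with
  | none => false
  | some h =>
    if PySem.Str.startswith h "/wiki/" then
      -- Exclude links to non-article pages
      let excluded_prefixes : List String :=
        ["/wiki/Special:", "/wiki/Help:", "/wiki/File:", "/wiki/Template:", "/wiki/Talk:",
         "/wiki/Category:", "/wiki/Portal:", "/wiki/Main_Page", "/wiki/User:", "/wiki/Wikipedia:"]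
      ! excluded_prefixes.any (fun p => PySem.Str.startswith h p)
    else false

-- ===== PORT B =====
def excludedNamespaces : PySem.Set String :=
  PySem.Set.ofList ["Special", "Help", "File", "Template", "Talk",
                    "Category", "Portal", "User", "Wikipedia"]

def is_valid_wiki_link_alt (href : Option String) : Bool :=
  match href with
  | none => false
  | some h =>
    if ! PySem.Str.startswith h "/wiki/" then false
    else
      let title := PySem.Str.slice h (some 6) none
      if PySem.Str.startswith title "Main_Page" then false
      else
        let i := PySem.Str.find title ":"
        if i < 0 then true
        else ! PySem.Set.contains excludedNamespaces (PySem.Str.slice title none (some i))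

-- ===== PRECONDITION & SPEC =====
def Spec_is_valid_wiki_link (href : Option String) (out : Bool) : Prop := out = is_valid_wiki_link_alt href
instance (href : Option String) (out : Bool) : Decidable (Spec_is_valid_wiki_link href out) := by unfold Spec_is_valid_wiki_link; infer_instance

-- ===== CLAIM (what is proved, stated in full; the proofs are below) =====
def Claim_equal_is_valid_wiki_link : Prop := ∀ (href : Option String), Dom_is_valid_wiki_link href → Spec_is_valid_wiki_link href (is_valid_wiki_link href)

-- ===== LEMMAS AND PROOFS =====

-- [c] is a prefix exactly of lists whose head is c
lemma single_prefix_iff (c : Char) (l : List Char) : [c] <+: l ↔ l.head? = some c := by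
  cases l with
  | nil => simp
  | cons a l =>
    constructor
    · rintro ⟨r, hr⟩; simp at hr; simp [hr.1]
    · intro h; simp at h; exact ⟨l, by simp [h]⟩

-- facts about the first occurrence of ':' when find does not return -1
lemma find_colon_spec (t : List Char) (hne : PySem.Chars.find t [':'] ≠ -1) :
    0 ≤ PySem.Chars.find t [':'] ∧
    t[(PySem.Chars.find t [':']).toNat]? = some ':' ∧
    ∀ j, j < (PySem.Chars.find t [':']).toNat → t[j]? ≠ some ':' := by
  have h0 := PySem.Chars.findFrom_zero t [':']
  have hs := PySem.Chars.findFrom_natCast_spec t [':'] 0 (Nat.zero_le _) (by rw [Nat.cast_zero, h0]; exact hne)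
  rw [Nat.cast_zero, h0] at hs
  obtain ⟨hle, hpre, hmin⟩ := hs
  refine ⟨hle, ?_, ?_⟩
  · have := (single_prefix_iff ':' _).mp hpre
    rwa [List.head?_drop] at this
  · intro j hj h
    exact hmin j (Nat.zero_le _) hj ((single_prefix_iff ':' _).mpr (by rwa [List.head?_drop]))

-- for a namespace name without ':', 'name:' is a prefix of t iff t's segment before the first ':' equals name
lemma ns_prefix_iff (ns t : List Char) (hns : ':' ∉ ns) (n : Nat)
    (hn : t[n]? = some ':') (hmin : ∀ j, j < n → t[j]? ≠ some ':') :
    (ns ++ [':']) <+: t ↔ t.take n = ns := by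
  constructor
  · rintro ⟨r, hr⟩
    have hlen : ns.length = n := by
      by_contra hne
      rcases Nat.lt_or_gt_of_ne hne with hlt | hgt
      · exact hmin ns.length hlt (by rw [← hr]; simp)
      · have : t[n]? = some ns[n] := by
          rw [← hr, List.append_assoc, List.getElem?_append_left (by omega)]
          simp [hgt]
        rw [hn] at this
        exact hns (by simp at this; rw [this]; exact List.getElem_mem _)
    subst hr
    rw [← hlen, List.append_assoc, List.take_left]
  · intro h
    have hlt : n < t.length := List.getElem?_eq_some_iff.mp hn |>.1
    refine ⟨t.drop (n + 1), ?_⟩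
    have hdrop : t.drop n = ':' :: t.drop (n + 1) := by
      rw [List.drop_eq_getElem_cons hlt]
      congr 1
      have := List.getElem?_eq_some_iff.mp hn
      simpa using this.2 ▸ rfl
    calc ns ++ [':'] ++ t.drop (n + 1) = t.take n ++ (':' :: t.drop (n + 1)) := by rw [h]; simp
    _ = t.take n ++ t.drop n := by rw [hdrop]
    _ = t := List.take_append_drop n t

lemma beq_string_toList (a b : String) : (a == b) = (a.toList == b.toList) := by
  by_cases h : a = b
  · simp [h]
  · have h2 : ¬ a.toList = b.toList := fun h' => h (String.toList_inj.mp h')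
    simp [h, h2]

-- Bool form of ns_prefix_iff
lemma ns_prefix_beq (ns t : List Char) (hns : ':' ∉ ns) (n : Nat)
    (hn : t[n]? = some ':') (hmin : ∀ j, j < n → t[j]? ≠ some ':') :
    (ns ++ [':']).isPrefixOf t = (t.take n == ns) := by
  rw [Bool.eq_iff_iff]
  simp [List.isPrefixOf_iff_prefix, ns_prefix_iff ns t hns n hn hmin]

-- a pattern containing ':' is no prefix of a list without ':'
lemma colon_no_prefix (t p : List Char) (hnin : ¬ ([':'] <:+: t)) (hp : ':' ∈ p) :
    p.isPrefixOf t = false := by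
  rw [Bool.eq_false_iff]
  intro hpre
  obtain ⟨s1, s2, hs⟩ := List.append_of_mem hp
  have hin : [':'] <:+: p := ⟨s1, s2, by simp [hs]⟩
  exact hnin (hin.trans (List.IsPrefix.isInfix (List.isPrefixOf_iff_prefix.mp hpre)))

-- the core: for t the part of the href after '/wiki/', A's remaining prefix scan equals B's classification
lemma core (t : List Char) :
    (!("Special:".toList.isPrefixOf t || "Help:".toList.isPrefixOf t || "File:".toList.isPrefixOf t ||
        "Template:".toList.isPrefixOf t || "Talk:".toList.isPrefixOf t || "Category:".toList.isPrefixOf t ||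
        "Portal:".toList.isPrefixOf t || "Main_Page".toList.isPrefixOf t || "User:".toList.isPrefixOf t ||
        "Wikipedia:".toList.isPrefixOf t)) =
    (if "Main_Page".toList.isPrefixOf t then false
     else if PySem.Chars.find t [':'] < 0 then true
     else !(PySem.List.slice t none (some (PySem.Chars.find t [':'])) == "Special".toList ||
            PySem.List.slice t none (some (PySem.Chars.find t [':'])) == "Help".toList ||
            PySem.List.slice t none (some (PySem.Chars.find t [':'])) == "File".toList ||
            PySem.List.slice t none (some (PySem.Chars.find t [':'])) == "Template".toList ||
            PySem.List.slice t none (some (PySem.Chars.find t [':'])) == "Talk".toList ||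
            PySem.List.slice t none (some (PySem.Chars.find t [':'])) == "Category".toList ||
            PySem.List.slice t none (some (PySem.Chars.find t [':'])) == "Portal".toList ||
            PySem.List.slice t none (some (PySem.Chars.find t [':'])) == "User".toList ||
            PySem.List.slice t none (some (PySem.Chars.find t [':'])) == "Wikipedia".toList)) := by
  by_cases hmp : "Main_Page".toList.isPrefixOf t
  · rw [if_pos hmp, hmp]
    simp only [Bool.or_true, Bool.true_or, Bool.not_true]
  · rw [if_neg hmp]
    by_cases hfind : PySem.Chars.find t [':'] = -1
    · have hnin : ¬ ([':'] <:+: t) := (PySem.Chars.find_eq_neg_one_iff t [':']).mp hfind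
      rw [hfind, if_pos (by norm_num : (-1 : Int) < 0),
          colon_no_prefix t _ hnin (by decide), colon_no_prefix t _ hnin (by decide),
          colon_no_prefix t _ hnin (by decide), colon_no_prefix t _ hnin (by decide),
          colon_no_prefix t _ hnin (by decide), colon_no_prefix t _ hnin (by decide),
          colon_no_prefix t _ hnin (by decide),
          Bool.eq_false_iff.mpr hmp,
          colon_no_prefix t _ hnin (by decide), colon_no_prefix t _ hnin (by decide)]
      rfl
    · obtain ⟨hle, hn, hmin⟩ := find_colon_spec t hfind
      rw [if_neg (by omega : ¬ (PySem.Chars.find t [':'] < 0)), PySem.List.slice_to t hle,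
          show "Special:".toList = "Special".toList ++ [':'] from by decide,
          show "Help:".toList = "Help".toList ++ [':'] from by decide,
          show "File:".toList = "File".toList ++ [':'] from by decide,
          show "Template:".toList = "Template".toList ++ [':'] from by decide,
          show "Talk:".toList = "Talk".toList ++ [':'] from by decide,
          show "Category:".toList = "Category".toList ++ [':'] from by decide,
          show "Portal:".toList = "Portal".toList ++ [':'] from by decide,
          show "User:".toList = "User".toList ++ [':'] from by decide,
          show "Wikipedia:".toList = "Wikipedia".toList ++ [':'] from by decide,
          ns_prefix_beq "Special".toList t (by decide) _ hn hmin,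
          ns_prefix_beq "Help".toList t (by decide) _ hn hmin,
          ns_prefix_beq "File".toList t (by decide) _ hn hmin,
          ns_prefix_beq "Template".toList t (by decide) _ hn hmin,
          ns_prefix_beq "Talk".toList t (by decide) _ hn hmin,
          ns_prefix_beq "Category".toList t (by decide) _ hn hmin,
          ns_prefix_beq "Portal".toList t (by decide) _ hn hmin,
          ns_prefix_beq "User".toList t (by decide) _ hn hmin,
          ns_prefix_beq "Wikipedia".toList t (by decide) _ hn hmin,
          Bool.eq_false_iff.mpr hmp]
      simp only [Bool.or_false]

-- ===== VERDICT (by name: the statement is the Claim_ definition above) =====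
theorem is_valid_wiki_link_spec : Claim_equal_is_valid_wiki_link := by
  intro href _
  unfold Spec_is_valid_wiki_link
  match href with
  | none => rfl
  | some h =>
    simp only [is_valid_wiki_link, is_valid_wiki_link_alt]
    cases hw : PySem.Str.startswith h "/wiki/" with
    | false => simp
    | true =>
      obtain ⟨t, ht⟩ : ∃ t, h.toList = "/wiki/".toList ++ t := by
        rw [PySem.Str.startswith_eq] at hw
        simp only [PySem.Chars.startswith, List.isPrefixOf_iff_prefix] at hw
        obtain ⟨r, hr⟩ := hw
        exact ⟨r, hr.symm⟩
      have htitle : (PySem.Str.slice h (some 6) none).toList = t := by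
        rw [PySem.Str.toList_slice, PySem.Chars.slice_eq_listSlice,
            PySem.List.slice_from h.toList (by norm_num : (0:Int) ≤ 6), ht]
        show List.drop ("/wiki/".toList.length) _ = t
        rw [List.drop_left]
      have hcancel : ∀ (p : List Char),
          ("/wiki/".toList ++ p).isPrefixOf ("/wiki/".toList ++ t) = p.isPrefixOf t := by
        intro p
        rw [Bool.eq_iff_iff]
        simp [List.isPrefixOf_iff_prefix]
      have hfindt : PySem.Str.find (PySem.Str.slice h (some 6) none) ":" = PySem.Chars.find t [':'] := by
        rw [PySem.Str.find_eq, htitle, show ":".toList = [':'] from by decide]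
      have hmpt : PySem.Str.startswith (PySem.Str.slice h (some 6) none) "Main_Page"
          = "Main_Page".toList.isPrefixOf t := by
        rw [PySem.Str.startswith_eq]
        simp only [PySem.Chars.startswith, htitle]
      have hslicet : ∀ (i : Int),
          (PySem.Str.slice (PySem.Str.slice h (some 6) none) none (some i)).toList
            = PySem.List.slice t none (some i) := by
        intro i
        rw [PySem.Str.toList_slice, PySem.Chars.slice_eq_listSlice, htitle]
      rw [if_pos rfl, if_neg (by simp)]
      simp only [List.any_cons, List.any_nil, Bool.or_false]
      rw [PySem.Str.startswith_eq, PySem.Str.startswith_eq, PySem.Str.startswith_eq,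
          PySem.Str.startswith_eq, PySem.Str.startswith_eq, PySem.Str.startswith_eq,
          PySem.Str.startswith_eq, PySem.Str.startswith_eq, PySem.Str.startswith_eq,
          PySem.Str.startswith_eq]
      simp only [PySem.Chars.startswith, ht]
      rw [show "/wiki/Special:".toList = "/wiki/".toList ++ "Special:".toList from by decide,
          show "/wiki/Help:".toList = "/wiki/".toList ++ "Help:".toList from by decide,
          show "/wiki/File:".toList = "/wiki/".toList ++ "File:".toList from by decide,
          show "/wiki/Template:".toList = "/wiki/".toList ++ "Template:".toList from by decide,
          show "/wiki/Talk:".toList = "/wiki/".toList ++ "Talk:".toList from by decide,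
          show "/wiki/Category:".toList = "/wiki/".toList ++ "Category:".toList from by decide,
          show "/wiki/Portal:".toList = "/wiki/".toList ++ "Portal:".toList from by decide,
          show "/wiki/Main_Page".toList = "/wiki/".toList ++ "Main_Page".toList from by decide,
          show "/wiki/User:".toList = "/wiki/".toList ++ "User:".toList from by decide,
          show "/wiki/Wikipedia:".toList = "/wiki/".toList ++ "Wikipedia:".toList from by decide,
          hcancel, hcancel, hcancel, hcancel, hcancel, hcancel, hcancel, hcancel, hcancel, hcancel,
          hmpt, hfindt]
      rw [show excludedNamespaces = ["Special", "Help", "File", "Template", "Talk",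
            "Category", "Portal", "User", "Wikipedia"] from by decide]
      simp only [PySem.Set.contains_eq_listContains, List.contains_cons, List.contains_nil,
        beq_string_toList, Bool.or_false, hslicet]
      have hc := core t
      simp only [Bool.or_assoc] at hc
      exact hc
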